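-- pv_equiv track=rewrite | github.com/dominicjtaylor/fx-agent | src/agent/active_features.py | format_active_features_for_prompt
-- ===== SOURCE A (Python) =====
-- from typing import List
--
-- def get_level_counts(active_features: List[dict]) -> dict:
--     """Return count of features at each hierarchy level."""
--     counts = {"primitive": 0, "transform": 0, "composite": 0}
--     for f in active_features:
--         level = f.get("level", "primitive")
--         if level in counts:
--             counts[level] += 1
--     return counts
--
-- def format_active_features_for_prompt(active_features: List[dict]) -> str:
--     """Concise summary for inclusion in Claude prompts, grouped by level."""
--     if not active_features:
--         return "No features currently in the active set."
--     counts = get_level_counts(active_features)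
--     lines = [
--         f"Active features: {len(active_features)} total "
--         f"({counts['primitive']} primitive, {counts['transform']} transform, {counts['composite']} composite)"
--     ]
--     for level in ("primitive", "transform", "composite"):
--         feats = [f for f in active_features if f.get("level", "primitive") == level]
--         if feats:
--             lines.append(f"  {level.capitalize()}s: " + ", ".join(f["name"] for f in feats))
--     return "\n".join(lines)
-- ===== SOURCE B (Python) =====
-- def format_active_features_for_prompt(active_features):
--     """Concise summary for inclusion in Claude prompts, grouped by level."""
--     if not active_features:
--         return "No features currently in the active set."
--     prims, trans, comps = [], [], []
--     for f in active_features: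
--         level = f.get("level", "primitive")
--         if level == "primitive":
--             prims.append(f["name"])
--         elif level == "transform":
--             trans.append(f["name"])
--         elif level == "composite":
--             comps.append(f["name"])
--     parts = [
--         f"Active features: {len(active_features)} total "
--         f"({len(prims)} primitive, {len(trans)} transform, {len(comps)} composite)"
--     ]
--     if prims:
--         parts.append("  Primitives: " + ", ".join(prims))
--     if trans:
--         parts.append("  Transforms: " + ", ".join(trans))
--     if comps:
--         parts.append("  Composites: " + ", ".join(comps))
--     return "\n".join(parts)
-- ===== Notes on version B (the rewrite author's own statement) =====
-- stated objective: simpler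
-- what changed: One grouping pass collecting the three name lists (counts = their lengths) replaces the separate get_level_counts counting dict plus three filter comprehensions; level lines are emitted from the collected lists.
import Mathlib
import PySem

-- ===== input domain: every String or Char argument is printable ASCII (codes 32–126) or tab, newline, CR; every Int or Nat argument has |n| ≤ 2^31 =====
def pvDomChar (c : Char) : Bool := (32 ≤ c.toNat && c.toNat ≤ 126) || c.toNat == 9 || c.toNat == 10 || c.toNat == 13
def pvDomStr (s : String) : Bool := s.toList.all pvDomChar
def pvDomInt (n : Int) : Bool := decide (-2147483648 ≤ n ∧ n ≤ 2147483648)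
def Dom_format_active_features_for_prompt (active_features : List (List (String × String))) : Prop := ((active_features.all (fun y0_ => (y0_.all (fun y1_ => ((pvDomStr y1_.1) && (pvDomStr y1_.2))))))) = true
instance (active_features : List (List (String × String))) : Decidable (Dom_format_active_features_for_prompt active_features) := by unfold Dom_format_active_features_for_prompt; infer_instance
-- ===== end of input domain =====

-- B replaces A's counting dict plus three filter passes with one grouping pass over the input;
-- equivalence is about the return value (neither mutates its argument).
-- Shared dict-access helpers (each Python feature dict is the Python dict built from its pair list):
def pvLvl (f : List (String × String)) : String :=
  (PySem.Dict.ofList f).getD "level" "primitive"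

-- f["name"]: Python raises KeyError when "name" is absent; those inputs are excluded by Pre_,
-- so the default "" is never observed on admitted inputs.
def pvName (f : List (String × String)) : String :=
  (PySem.Dict.ofList f).getD "name" ""

-- ===== PORT A =====
def get_level_counts (active_features : List (List (String × String))) : PySem.Dict String Int :=
  active_features.foldl
    (fun counts f =>
      let level := pvLvl f
      if counts.contains level then counts.modify level 0 (· + 1) else counts)
    (PySem.Dict.ofList [("primitive", 0), ("transform", 0), ("composite", 0)])

-- str.capitalize(): first char uppercased, rest lowered (exact on the ASCII domain)
def pvCapitalize (s : String) : String :=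
  match s.toList with
  | [] => s
  | c :: rest => String.ofList (PySem.Chars.upperChar c :: PySem.Chars.lower rest)

def format_active_features_for_prompt (active_features : List (List (String × String))) : String :=
  if active_features = [] then "No features currently in the active set."
  else
    let counts := get_level_counts active_features
    let header := "Active features: " ++ PySem.Int.toStr (active_features.length : Int) ++ " total ("
      ++ PySem.Int.toStr (counts.getD "primitive" 0) ++ " primitive, "
      ++ PySem.Int.toStr (counts.getD "transform" 0) ++ " transform, "
      ++ PySem.Int.toStr (counts.getD "composite" 0) ++ " composite)"
    let lines := ["primitive", "transform", "composite"].foldl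
      (fun lines level =>
        let feats := active_features.filter (fun f => pvLvl f == level)
        if feats ≠ [] then
          lines ++ ["  " ++ pvCapitalize level ++ "s: " ++ PySem.Str.join ", " (feats.map pvName)]
        else lines)
      [header]
    PySem.Str.join "\n" lines

-- ===== PORT B =====
def format_active_features_for_prompt_alt (active_features : List (List (String × String))) : String :=
  if active_features = [] then "No features currently in the active set."
  else
    let groups := active_features.foldl
      (fun (g : List String × List String × List String) f =>
        let level := (PySem.Dict.ofList f).getD "level" "primitive"
        if level = "primitive" then (g.1 ++ [pvName f], g.2.1, g.2.2)
        else if level = "transform" then (g.1, g.2.1 ++ [pvName f], g.2.2)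
        else if level = "composite" then (g.1, g.2.1, g.2.2 ++ [pvName f])
        else g)
      ([], [], [])
    let header := "Active features: " ++ PySem.Int.toStr (active_features.length : Int) ++ " total ("
      ++ PySem.Int.toStr (groups.1.length : Int) ++ " primitive, "
      ++ PySem.Int.toStr (groups.2.1.length : Int) ++ " transform, "
      ++ PySem.Int.toStr (groups.2.2.length : Int) ++ " composite)"
    let parts := [header]
      ++ (if groups.1 ≠ [] then ["  Primitives: " ++ PySem.Str.join ", " groups.1] else [])
      ++ (if groups.2.1 ≠ [] then ["  Transforms: " ++ PySem.Str.join ", " groups.2.1] else [])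
      ++ (if groups.2.2 ≠ [] then ["  Composites: " ++ PySem.Str.join ", " groups.2.2] else [])
    PySem.Str.join "\n" parts

-- ===== PRECONDITION & SPEC =====
-- Pre_ excludes exactly the inputs on which A raises KeyError: a feature whose (defaulted) level
-- is one of the three known levels but which has no "name" key.  B raises on the same inputs.
def Pre_format_active_features_for_prompt (active_features : List (List (String × String))) : Prop :=
  ∀ f ∈ active_features,
    ((PySem.Dict.ofList f).getD "level" "primitive" = "primitive"
      ∨ (PySem.Dict.ofList f).getD "level" "primitive" = "transform"
      ∨ (PySem.Dict.ofList f).getD "level" "primitive" = "composite")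
    → (PySem.Dict.ofList f).contains "name" = true
instance (active_features : List (List (String × String))) : Decidable (Pre_format_active_features_for_prompt active_features) := by unfold Pre_format_active_features_for_prompt; infer_instance

def pvWitness_format_active_features_for_prompt : (List (List (String × String))) :=
  [[("name", "a")], [("name", "b"), ("level", "transform")], [("level", "weird")]]

def Spec_format_active_features_for_prompt (active_features : List (List (String × String))) (out : String) : Prop := out = format_active_features_for_prompt_alt active_features
instance (active_features : List (List (String × String))) (out : String) : Decidable (Spec_format_active_features_for_prompt active_features out) := by unfold Spec_format_active_features_for_prompt; infer_instance

-- ===== CLAIM (what is proved, stated in full; the proofs are below) =====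
def Claim_equal_format_active_features_for_prompt : Prop := ∀ (active_features : List (List (String × String))), Dom_format_active_features_for_prompt active_features → Pre_format_active_features_for_prompt active_features → Spec_format_active_features_for_prompt active_features (format_active_features_for_prompt active_features)

-- ===== LEMMAS AND PROOFS =====

-- A's counting loop, characterised: for a key the initial dict contains, the final count is the
-- initial value plus the number of features at that level.
theorem counts_foldl_getD (fs : List (List (String × String))) (d : PySem.Dict String Int)
    (k : String) (hk : d.contains k = true) :
    (fs.foldl (fun counts f =>
        let level := pvLvl f
        if counts.contains level then counts.modify level 0 (· + 1) else counts) d).getD k 0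
      = d.getD k 0 + ((fs.countP (fun f => pvLvl f == k) : Nat) : Int) := by
  induction fs generalizing d with
  | nil => simp
  | cons f fs ih =>
    simp only [List.foldl_cons, List.countP_cons]
    by_cases hc : d.contains (pvLvl f) = true
    · rw [if_pos hc, ih _ (by simp [PySem.Dict.contains_modify, hk]), PySem.Dict.getD_modify]
      by_cases hlv : pvLvl f = k
      · subst hlv; simp; ring
      · simp [hlv, Ne.symm hlv]
    · rw [if_neg hc, ih _ hk]
      have hlv : pvLvl f ≠ k := fun h => hc (h ▸ hk)
      simp [hlv]

-- B's grouping loop, characterised: each component is the accumulator followed by the names of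
-- the features filtered at that level (A's comprehension).
theorem groups_foldl (fs : List (List (String × String)))
    (p t c : List String) :
    fs.foldl (fun (g : List String × List String × List String) f =>
        let level := (PySem.Dict.ofList f).getD "level" "primitive"
        if level = "primitive" then (g.1 ++ [pvName f], g.2.1, g.2.2)
        else if level = "transform" then (g.1, g.2.1 ++ [pvName f], g.2.2)
        else if level = "composite" then (g.1, g.2.1, g.2.2 ++ [pvName f])
        else g) (p, t, c)
      = (p ++ (fs.filter (fun f => pvLvl f == "primitive")).map pvName,
         t ++ (fs.filter (fun f => pvLvl f == "transform")).map pvName,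
         c ++ (fs.filter (fun f => pvLvl f == "composite")).map pvName) := by
  induction fs generalizing p t c with
  | nil => simp
  | cons f fs ih =>
    simp only [List.foldl_cons, List.filter_cons]
    by_cases h1 : (PySem.Dict.ofList f).getD "level" "primitive" = "primitive"
    · simp [pvLvl, h1, ih]
    · by_cases h2 : (PySem.Dict.ofList f).getD "level" "primitive" = "transform"
      · simp [pvLvl, h2, ih]
      · by_cases h3 : (PySem.Dict.ofList f).getD "level" "primitive" = "composite"
        · simp [pvLvl, h3, ih]
        · simp [pvLvl, h1, h2, h3, ih]

-- ===== VERDICT (by name: the statement is the Claim_ definition above) =====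
theorem format_active_features_for_prompt_spec : Claim_equal_format_active_features_for_prompt := by
  intro af _ _
  show format_active_features_for_prompt af = format_active_features_for_prompt_alt af
  by_cases haf : af = []
  · simp [format_active_features_for_prompt, format_active_features_for_prompt_alt, haf]
  · unfold format_active_features_for_prompt format_active_features_for_prompt_alt get_level_counts
    rw [if_neg haf, if_neg haf]
    simp only [groups_foldl af [] [] [],
      counts_foldl_getD af (PySem.Dict.ofList [("primitive", 0), ("transform", 0), ("composite", 0)]) "primitive" (by decide),
      counts_foldl_getD af (PySem.Dict.ofList [("primitive", 0), ("transform", 0), ("composite", 0)]) "transform" (by decide),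
      counts_foldl_getD af (PySem.Dict.ofList [("primitive", 0), ("transform", 0), ("composite", 0)]) "composite" (by decide)]
    by_cases e1 : af.filter (fun f => pvLvl f == "primitive") = [] <;>
    by_cases e2 : af.filter (fun f => pvLvl f == "transform") = [] <;>
    by_cases e3 : af.filter (fun f => pvLvl f == "composite") = [] <;>
      simp [e1, e2, e3, List.foldl, List.countP_eq_length_filter,
        (by decide : (PySem.Dict.ofList [("primitive", (0:Int)), ("transform", 0), ("composite", 0)]).getD "primitive" 0 = 0),
        (by decide : (PySem.Dict.ofList [("primitive", (0:Int)), ("transform", 0), ("composite", 0)]).getD "transform" 0 = 0),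
        (by decide : (PySem.Dict.ofList [("primitive", (0:Int)), ("transform", 0), ("composite", 0)]).getD "composite" 0 = 0),
        (by decide : ("  " ++ pvCapitalize "primitive" ++ "s: ") = "  Primitives: "),
        (by decide : ("  " ++ pvCapitalize "transform" ++ "s: ") = "  Transforms: "),
        (by decide : ("  " ++ pvCapitalize "composite" ++ "s: ") = "  Composites: ")]
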